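-- pv_equiv track=rewrite | github.com/adylagad/gh-api-graveyard | detector/utils.py | match_log_to_spec
-- ===== SOURCE A (Python) =====
-- from typing import List, Dict, Union, Optional
--
-- def match_log_to_spec(
--     log_path: str,
--     spec_endpoints: List[Dict[str, str]],
--     method: Optional[str] = None
-- ) -> Optional[str]:
--     """
--     Match a concrete request path to an OpenAPI path template.
--
--     Uses simple segment matching: splits paths by '/' and compares each segment.
--     Segments starting with '{' in the spec are treated as parameters.
--
--     Args:
--         log_path: Concrete path from logs (e.g., '/v1/users/123')
--         spec_endpoints: List of endpoint dicts with 'method' and 'path'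
--         method: Optional HTTP method to filter by (e.g., 'GET')
--
--     Returns:
--         Matched OpenAPI path template or None if no match found
--
--     Example:
--         >>> endpoints = [
--         ...     {'method': 'GET', 'path': '/v1/users/{id}'},
--         ...     {'method': 'POST', 'path': '/v1/users'}
--         ... ]
--         >>> match_log_to_spec('/v1/users/123', endpoints, 'GET')
--         '/v1/users/{id}'
--         >>> match_log_to_spec('/v1/users', endpoints, 'POST')
--         '/v1/users'
--     """
--     # Normalize the log path
--     log_path = log_path.strip()
--     if not log_path:
--         return None
--
--     # Split log path into segments
--     log_segments = [s for s in log_path.split('/') if s]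
--
--     # Filter endpoints by method if provided
--     candidates = spec_endpoints
--     if method:
--         method_upper = method.upper()
--         candidates = [ep for ep in spec_endpoints if ep.get('method') == method_upper]
--
--     # Try to match each candidate endpoint
--     for endpoint in candidates:
--         spec_path = endpoint.get('path', '')
--         if not spec_path:
--             continue
--
--         # Split spec path into segments
--         spec_segments = [s for s in spec_path.split('/') if s]
--
--         # Must have same number of segments
--         if len(log_segments) != len(spec_segments):
--             continue
--
--         # Check if all segments match
--         match = True
--         for log_seg, spec_seg in zip(log_segments, spec_segments):
--             # Spec segment is a parameter (e.g., {id}, {user_id})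
--             if spec_seg.startswith('{') and spec_seg.endswith('}'):
--                 continue  # Parameter segments match anything
--
--             # Literal segments must match exactly
--             if log_seg != spec_seg:
--                 match = False
--                 break
--
--         if match:
--             return spec_path
--
--     return None
-- ===== SOURCE B (Python) =====
-- from typing import List, Dict, Union, Optional
--
--
-- def _segments(path):
--     return [s for s in path.split('/') if s]
--
--
-- def _is_param(seg):
--     return seg.startswith('{') and seg.endswith('}')
--
--
-- def _matches(log_segs, spec_segs):
--     # Recursive segment matcher; length mismatch falls out of the recursion.
--     if not log_segs and not spec_segs:
--         return True
--     if not log_segs or not spec_segs: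
--         return False
--     head_ok = _is_param(spec_segs[0]) or log_segs[0] == spec_segs[0]
--     return head_ok and _matches(log_segs[1:], spec_segs[1:])
--
--
-- def match_log_to_spec(
--     log_path: str,
--     spec_endpoints: List[Dict[str, str]],
--     method: Optional[str] = None
-- ) -> Optional[str]:
--     stripped = log_path.strip()
--     if not stripped:
--         return None
--     log_segs = _segments(stripped)
--     want = method.upper() if method else None
--     return next(
--         (ep.get('path', '') for ep in spec_endpoints
--          if (want is None or ep.get('method') == want)
--          and ep.get('path', '')
--          and _matches(log_segs, _segments(ep.get('path', '')))),
--         None)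
-- ===== Notes on version B (the rewrite author's own statement) =====
-- stated objective: idiomatic
-- what changed: Replaces A's pre-built candidates list plus flag-and-break inner loop (with a separate length check) by a single next() over a generator with the method filter inlined and a recursive segment matcher whose recursion subsumes the length comparison.
import Mathlib
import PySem

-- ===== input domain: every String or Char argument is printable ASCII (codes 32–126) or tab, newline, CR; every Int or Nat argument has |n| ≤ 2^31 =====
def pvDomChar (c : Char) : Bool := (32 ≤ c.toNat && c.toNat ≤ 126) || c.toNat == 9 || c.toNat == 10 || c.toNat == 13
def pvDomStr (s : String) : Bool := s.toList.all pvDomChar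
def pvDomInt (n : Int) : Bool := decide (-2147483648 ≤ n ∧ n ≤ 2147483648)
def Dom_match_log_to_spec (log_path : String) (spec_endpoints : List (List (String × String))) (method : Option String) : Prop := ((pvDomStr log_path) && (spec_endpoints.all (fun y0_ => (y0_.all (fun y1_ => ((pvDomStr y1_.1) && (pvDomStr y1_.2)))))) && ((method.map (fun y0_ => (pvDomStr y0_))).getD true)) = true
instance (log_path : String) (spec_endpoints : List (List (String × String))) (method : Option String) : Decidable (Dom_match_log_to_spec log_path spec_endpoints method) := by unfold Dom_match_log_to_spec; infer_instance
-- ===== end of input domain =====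

-- B replaces A's candidates-list + flag-and-break inner loop (with separate length check) by a
-- single search with an inlined method filter and a recursive segment matcher; same cost, more idiomatic.
-- ===== PORT A =====
-- inner 'for log_seg, spec_seg in zip(...)' loop with the match flag and break
def pvA_segLoop : List (String × String) → Bool
  | [] => true
  | (l, s) :: rest =>
    if PySem.Str.startswith s "{" && PySem.Str.endswith s "}" then pvA_segLoop rest
    else if l != s then false
    else pvA_segLoop rest

-- outer 'for endpoint in candidates' loop
def pvA_tryLoop (logSegs : List String) : List (List (String × String)) → Option String
  | [] => none
  | ep :: rest =>
    let specPath := ((PySem.Dict.mk ep).get? "path").getD ""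
    if specPath == "" then pvA_tryLoop logSegs rest
    else
      let specSegs := ((PySem.Str.split? specPath "/").getD []).filter (· != "")
      if logSegs.length != specSegs.length then pvA_tryLoop logSegs rest
      else if pvA_segLoop (logSegs.zip specSegs) then some specPath
      else pvA_tryLoop logSegs rest

def match_log_to_spec (log_path : String) (spec_endpoints : List (List (String × String))) (method : Option String) : Option String :=
  let lp := PySem.Str.strip log_path
  if lp == "" then none
  else
    let logSegs := ((PySem.Str.split? lp "/").getD []).filter (· != "")
    let candidates :=
      match method with
      | some m =>
        if m != "" then
          let methodUpper := PySem.Str.upper m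
          spec_endpoints.filter (fun ep => (PySem.Dict.mk ep).get? "method" == some methodUpper)
        else spec_endpoints
      | none => spec_endpoints
    pvA_tryLoop logSegs candidates

-- ===== PORT B =====
def pvB_segments (path : String) : List String :=
  ((PySem.Str.split? path "/").getD []).filter (· != "")

def pvB_isParam (seg : String) : Bool :=
  PySem.Str.startswith seg "{" && PySem.Str.endswith seg "}"

def pvB_matches : List String → List String → Bool
  | [], [] => true
  | [], _ :: _ => false
  | _ :: _, [] => false
  | l :: ls, s :: ss => (pvB_isParam s || l == s) && pvB_matches ls ss

def match_log_to_spec_alt (log_path : String) (spec_endpoints : List (List (String × String))) (method : Option String) : Option String :=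
  let stripped := PySem.Str.strip log_path
  if stripped == "" then none
  else
    let logSegs := pvB_segments stripped
    let want : Option String :=
      match method with
      | some m => if m != "" then some (PySem.Str.upper m) else none
      | none => none
    (spec_endpoints.find? (fun ep =>
        (want.isNone || (PySem.Dict.mk ep).get? "method" == want)
        && ((PySem.Dict.mk ep).get? "path").getD "" != ""
        && pvB_matches logSegs (pvB_segments (((PySem.Dict.mk ep).get? "path").getD "")))).map
      (fun ep => ((PySem.Dict.mk ep).get? "path").getD "")

-- ===== PRECONDITION & SPEC =====
def Spec_match_log_to_spec (log_path : String) (spec_endpoints : List (List (String × String))) (method : Option String) (out : Option String) : Prop := out = match_log_to_spec_alt log_path spec_endpoints method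
instance (log_path : String) (spec_endpoints : List (List (String × String))) (method : Option String) (out : Option String) : Decidable (Spec_match_log_to_spec log_path spec_endpoints method out) := by unfold Spec_match_log_to_spec; infer_instance

-- ===== CLAIM (what is proved, stated in full; the proofs are below) =====
def Claim_equal_match_log_to_spec : Prop := ∀ (log_path : String) (spec_endpoints : List (List (String × String))) (method : Option String), Dom_match_log_to_spec log_path spec_endpoints method → Spec_match_log_to_spec log_path spec_endpoints method (match_log_to_spec log_path spec_endpoints method)

-- ===== LEMMAS AND PROOFS =====

-- ===== LEMMAS =====
lemma pvB_matches_eq (ls ss : List String) :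
    pvB_matches ls ss = (decide (ls.length = ss.length) && pvA_segLoop (ls.zip ss)) := by
  induction ls generalizing ss with
  | nil => cases ss <;> simp [pvB_matches, pvA_segLoop]
  | cons l ls ih =>
    cases ss with
    | nil => simp [pvB_matches, pvA_segLoop]
    | cons s ss =>
      simp only [pvB_matches, List.zip_cons_cons, pvA_segLoop, pvB_isParam, ih, List.length_cons]
      cases hP : PySem.Str.startswith s "{" && PySem.Str.endswith s "}" <;>
        cases hE : l == s <;>
        simp [hP, hE] <;> simp_all

lemma pvA_tryLoop_cons (logSegs : List String) (ep : List (String × String))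
    (rest : List (List (String × String))) :
    pvA_tryLoop logSegs (ep :: rest) =
      (if (((PySem.Dict.mk ep).get? "path").getD "" == "") then pvA_tryLoop logSegs rest
       else if (logSegs.length !=
           (((PySem.Str.split? (((PySem.Dict.mk ep).get? "path").getD "") "/").getD []).filter
             (· != "")).length) then pvA_tryLoop logSegs rest
       else if pvA_segLoop (logSegs.zip
           (((PySem.Str.split? (((PySem.Dict.mk ep).get? "path").getD "") "/").getD []).filter
             (· != ""))) then some (((PySem.Dict.mk ep).get? "path").getD "")
       else pvA_tryLoop logSegs rest) := rfl

lemma pvA_find (logSegs : List String) (p : List (String × String) → Bool)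
    (eps : List (List (String × String))) :
    pvA_tryLoop logSegs (eps.filter p) =
      (eps.find? (fun ep =>
        p ep
        && ((PySem.Dict.mk ep).get? "path").getD "" != ""
        && pvB_matches logSegs (pvB_segments (((PySem.Dict.mk ep).get? "path").getD "")))).map
        (fun ep => ((PySem.Dict.mk ep).get? "path").getD "") := by
  induction eps with
  | nil => rfl
  | cons ep rest ih =>
    rw [List.filter_cons, List.find?_cons]
    cases hp : p ep with
    | false => simpa using ih
    | true =>
      simp only [if_true]
      rw [pvA_tryLoop_cons]
      cases hpath : (((PySem.Dict.mk ep).get? "path").getD "" == "") with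
      | true => simp [bne, hpath, ih]
      | false =>
        cases hlen : (logSegs.length !=
            (((PySem.Str.split? (((PySem.Dict.mk ep).get? "path").getD "") "/").getD []).filter
              (· != "")).length) with
        | true =>
          have hd : logSegs.length ≠
              (((PySem.Str.split? (((PySem.Dict.mk ep).get? "path").getD "") "/").getD []).filter
                (fun x => !(x == ""))).length := by simpa [bne] using hlen
          simp [bne, hpath, pvB_matches_eq, pvB_segments, hd, ih]
        | false =>
          have hd : logSegs.length =
              (((PySem.Str.split? (((PySem.Dict.mk ep).get? "path").getD "") "/").getD []).filter
                (fun x => !(x == ""))).length := by simpa [bne] using hlen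
          cases hm : pvA_segLoop (logSegs.zip
              (((PySem.Str.split? (((PySem.Dict.mk ep).get? "path").getD "") "/").getD []).filter
                (fun x => !(x == "")))) with
          | true => simp [bne, hpath, hm, pvB_matches_eq, pvB_segments, hd]
          | false => simp [bne, hpath, hm, pvB_matches_eq, pvB_segments, hd, ih]

-- ===== VERDICT (by name: the statement is the Claim_ definition above) =====
theorem match_log_to_spec_spec : Claim_equal_match_log_to_spec := by
  intro log_path spec_endpoints method _
  unfold Spec_match_log_to_spec match_log_to_spec match_log_to_spec_alt
  cases hs : (PySem.Str.strip log_path == "") with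
  | true => simp [hs]
  | false =>
    simp only [hs, Bool.false_eq_true, if_false]
    cases method with
    | none =>
      have := pvA_find (((PySem.Str.split? (PySem.Str.strip log_path) "/").getD []).filter (· != ""))
        (fun _ => true) spec_endpoints
      simpa [pvB_segments, List.filter_true] using this
    | some m =>
      cases hm : (m != "") with
      | false =>
        have hme : m = "" := by simpa using hm
        have := pvA_find (((PySem.Str.split? (PySem.Str.strip log_path) "/").getD []).filter (· != ""))
          (fun _ => true) spec_endpoints
        simpa [hme, pvB_segments, List.filter_true] using this
      | true =>
        have := pvA_find (((PySem.Str.split? (PySem.Str.strip log_path) "/").getD []).filter (· != ""))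
          (fun ep => (PySem.Dict.mk ep).get? "method" == some (PySem.Str.upper m)) spec_endpoints
        simp only [hm, if_true]
        simpa [pvB_segments, hm] using this
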